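-- pv_equiv track=rewrite | github.com/kishanp519/CS100 | Homework/HW10_KishanPatel.py | shareALetter
-- ===== SOURCE A (Python) =====
-- def shareALetter(wordList):
--     sharesLetters = {}
--     for word in wordList:
--         sharedWords = []
--         for iteratingWord in wordList:
--             for x in range(len(word)):
--                 if word[x] in iteratingWord and iteratingWord not in sharedWords:
--                     sharedWords.append(iteratingWord)
--         sharesLetters[word] = sharedWords
--     return sharesLetters
-- ===== SOURCE B (Python) =====
-- def shareALetter(wordList):
--     # Inverted index: letter -> set of words containing it; then one union + one
--     # ordered filter pass per distinct word, instead of pairwise letter rescans.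
--     index = {}
--     for w in wordList:
--         for c in set(w):
--             index.setdefault(c, set()).add(w)
--     sharesLetters = {}
--     for w in wordList:
--         if w not in sharesLetters:
--             candidates = set()
--             for c in set(w):
--                 candidates |= index[c]
--             neighbours = []
--             for v in wordList:
--                 if v in candidates and v not in neighbours:
--                     neighbours.append(v)
--             sharesLetters[w] = neighbours
--     return sharesLetters
-- ===== Notes on version B (the rewrite author's own statement) =====
-- stated objective: alternative
-- what changed: Replaces the pairwise letter-by-letter rescan with an inverted index letter->words built once, a per-word union of index buckets, and a single ordered filter pass over wordList per distinct key (duplicate keys computed once).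
import Mathlib
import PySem

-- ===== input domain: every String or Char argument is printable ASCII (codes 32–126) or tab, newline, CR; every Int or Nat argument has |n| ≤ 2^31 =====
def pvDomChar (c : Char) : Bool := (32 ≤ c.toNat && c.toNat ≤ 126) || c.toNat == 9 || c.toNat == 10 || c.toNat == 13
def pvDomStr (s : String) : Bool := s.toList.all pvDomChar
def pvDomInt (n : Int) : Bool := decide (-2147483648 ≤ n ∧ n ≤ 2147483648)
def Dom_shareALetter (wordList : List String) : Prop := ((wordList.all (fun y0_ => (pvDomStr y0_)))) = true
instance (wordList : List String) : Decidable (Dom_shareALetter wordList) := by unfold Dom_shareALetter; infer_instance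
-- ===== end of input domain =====

-- B replaces A's cubic pairwise letter-by-letter rescan by an inverted index
-- (letter -> set of words), a per-word union of buckets and one ordered filter
-- pass over wordList per distinct key; same return value everywhere.

-- ===== PORT A =====
-- word[x] with x in range(len(word)) is always in range, so pyGetD with a dummy
-- default transliterates it exactly; 'word[x] in iteratingWord' is a single-char
-- substring test = char membership in the code-point list (exact).
def shareALetter (wordList : List String) : List (String × List String) :=
  (wordList.foldl (fun d word =>
    PySem.Dict.insert d word
      (wordList.foldl (fun sharedWords iteratingWord =>
        (PySem.List.pyRange 0 (PySem.Str.len word) 1).foldl (fun sw x =>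
          if iteratingWord.toList.contains (PySem.List.pyGetD word.toList x ' ')
              && !(sw.contains iteratingWord)
          then sw ++ [iteratingWord] else sw) sharedWords) []))
    PySem.Dict.empty).items

-- ===== PORT B =====
-- index[c] in Source B is looked up only for c ∈ w, which pass 1 has inserted, so
-- getD with an empty default is exact (the default is never reached).
def shareALetter_alt (wordList : List String) : List (String × List String) :=
  let index : PySem.Dict Char (PySem.Set String) :=
    wordList.foldl (fun d w =>
      (PySem.Set.ofList w.toList).foldl (fun d2 c =>
        PySem.Dict.insert d2 c (PySem.Set.add (PySem.Dict.getD d2 c PySem.Set.empty) w)) d)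
      PySem.Dict.empty
  (wordList.foldl (fun res w =>
    if PySem.Dict.contains res w then res
    else
      let candidates : PySem.Set String :=
        (PySem.Set.ofList w.toList).foldl (fun s c =>
          PySem.Set.union s (PySem.Dict.getD index c PySem.Set.empty)) PySem.Set.empty
      PySem.Dict.insert res w
        (wordList.foldl (fun neighbours v =>
          if PySem.Set.contains candidates v && !(neighbours.contains v)
          then neighbours ++ [v] else neighbours) []))
    PySem.Dict.empty).items

-- ===== PRECONDITION & SPEC =====
def Spec_shareALetter (wordList : List String) (out : List (String × List String)) : Prop := out = shareALetter_alt wordList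
instance (wordList : List String) (out : List (String × List String)) : Decidable (Spec_shareALetter wordList out) := by unfold Spec_shareALetter; infer_instance

-- ===== CLAIM (what is proved, stated in full; the proofs are below) =====
def Claim_equal_shareALetter : Prop := ∀ (wordList : List String), Dom_shareALetter wordList → Spec_shareALetter wordList (shareALetter wordList)

-- ===== LEMMAS AND PROOFS =====

-- Canonical forms --------------------------------------------------------

/-- `v` shares a letter with `w`. -/
def pvShares (w v : String) : Bool := w.toList.any (fun c => v.toList.contains c)

/-- The neighbour list of `w`: wordList order, value-level dedup. -/
def pvShare (wordList : List String) (w : String) : List String :=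
  wordList.foldl (fun ns v => if pvShares w v && !(ns.contains v) then ns ++ [v] else ns) []

-- Step A1/A2: A's inner char loop appends iteratingWord at most once ------

theorem pvInnerStay (iw : String) (cs : List Char) (sw : List String)
    (h : sw.contains iw = true) :
    cs.foldl (fun sw2 c => if iw.toList.contains c && !(sw2.contains iw)
      then sw2 ++ [iw] else sw2) sw = sw := by
  induction cs generalizing sw with
  | nil => rfl
  | cons c cs ih =>
    rw [List.foldl_cons]
    rw [h]
    simp only [Bool.not_true, Bool.and_false, Bool.false_eq_true, if_false]
    exact ih sw h

theorem pvInnerChar (iw : String) (cs : List Char) (sw : List String) :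
    cs.foldl (fun sw2 c => if iw.toList.contains c && !(sw2.contains iw)
      then sw2 ++ [iw] else sw2) sw
    = if cs.any (fun c => iw.toList.contains c) && !(sw.contains iw)
      then sw ++ [iw] else sw := by
  induction cs generalizing sw with
  | nil => simp
  | cons c cs ih =>
    rw [List.foldl_cons]
    cases hm : sw.contains iw with
    | true =>
      simp only [List.any_cons, Bool.not_true, Bool.and_false,
        Bool.false_eq_true, if_false]
      exact pvInnerStay iw cs sw hm
    | false =>
      cases hc : iw.toList.contains c with
      | true =>
        simp only [hc, List.any_cons, Bool.not_false, Bool.and_true,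
          Bool.true_or, if_true]
        exact pvInnerStay iw cs _ (by simp)
      | false =>
        simp only [hc, List.any_cons, Bool.not_false, Bool.and_true,
          Bool.false_or, Bool.false_eq_true, if_false]
        rw [ih sw, hm]
        simp only [Bool.not_false, Bool.and_true]

/-- A's whole inner computation for one word equals `pvShare`. -/
theorem pvInnerEq (wordList : List String) (w : String) :
    wordList.foldl (fun sharedWords iw =>
      (PySem.List.pyRange 0 (PySem.Str.len w) 1).foldl (fun sw x =>
        if iw.toList.contains (PySem.List.pyGetD w.toList x ' ')
            && !(sw.contains iw)
        then sw ++ [iw] else sw) sharedWords) []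
    = pvShare wordList w := by
  unfold pvShare
  apply PySem.List.foldl_congr_mem
  intro acc iw _
  rw [show PySem.Str.len w = ((w.toList.length : Int)) from by
        simp [PySem.Str.len_eq],
      PySem.List.foldl_pyRange_zero_pyGetD' w.toList ' '
        (fun sw c => if iw.toList.contains c && !(sw.contains iw)
          then sw ++ [iw] else sw) acc,
      pvInnerChar]
  rfl

-- Step B: the index, the candidate union, the filter ----------------------

/-- Membership in the buckets after one word's inner index pass. -/
theorem pvIndexStep (w : String) (cs : List Char)
    (d : PySem.Dict Char (PySem.Set String)) (c : Char) (v : String) :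
    v ∈ PySem.Dict.getD
        (cs.foldl (fun d2 c' =>
          PySem.Dict.insert d2 c' (PySem.Set.add (PySem.Dict.getD d2 c' PySem.Set.empty) w)) d)
        c PySem.Set.empty
    ↔ v ∈ PySem.Dict.getD d c PySem.Set.empty ∨ (c ∈ cs ∧ v = w) := by
  induction cs generalizing d with
  | nil => simp
  | cons c' cs ih =>
    rw [List.foldl_cons, ih]
    by_cases h : c = c'
    · subst h
      simp [PySem.Set.mem_add]
      tauto
    · simp [PySem.Dict.getD_insert, h]

/-- Membership in the final index's buckets. -/
theorem pvIndexMem (l : List String)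
    (d : PySem.Dict Char (PySem.Set String)) (c : Char) (v : String) :
    v ∈ PySem.Dict.getD
        (l.foldl (fun d w =>
          (PySem.Set.ofList w.toList).foldl (fun d2 c' =>
            PySem.Dict.insert d2 c' (PySem.Set.add (PySem.Dict.getD d2 c' PySem.Set.empty) w)) d) d)
        c PySem.Set.empty
    ↔ v ∈ PySem.Dict.getD d c PySem.Set.empty ∨ ∃ w ∈ l, c ∈ w.toList ∧ v = w := by
  induction l generalizing d with
  | nil => simp
  | cons w l ih =>
    rw [List.foldl_cons, ih, pvIndexStep]
    constructor
    · rintro ((h | ⟨h1, rfl⟩) | ⟨u, hu, h1, rfl⟩)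
      · exact Or.inl h
      · refine Or.inr ⟨v, List.mem_cons_self .., ?_, rfl⟩
        rwa [PySem.Set.mem_ofList] at h1
      · exact Or.inr ⟨v, List.mem_cons_of_mem _ hu, h1, rfl⟩
    · rintro (h | ⟨u, hu, h1, rfl⟩)
      · exact Or.inl (Or.inl h)
      · rcases List.mem_cons.mp hu with rfl | hu
        · exact Or.inl (Or.inr ⟨by rwa [PySem.Set.mem_ofList], rfl⟩)
        · exact Or.inr ⟨v, hu, h1, rfl⟩

/-- Membership in the union of the buckets of `w`'s letters. -/
theorem pvUnionMem (index : PySem.Dict Char (PySem.Set String)) (cs : List Char)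
    (s : PySem.Set String) (v : String) :
    v ∈ cs.foldl (fun s c => PySem.Set.union s (PySem.Dict.getD index c PySem.Set.empty)) s
    ↔ v ∈ s ∨ ∃ c ∈ cs, v ∈ PySem.Dict.getD index c PySem.Set.empty := by
  induction cs generalizing s with
  | nil => simp
  | cons c cs ih =>
    rw [List.foldl_cons, ih]
    simp [PySem.Set.mem_union]
    tauto

/-- For `v ∈ wordList`, B's candidate test is exactly `pvShares w v`. -/
theorem pvCandEq (wordList : List String) (w v : String) (hv : v ∈ wordList) :
    PySem.Set.contains
      ((PySem.Set.ofList w.toList).foldl (fun s c =>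
        PySem.Set.union s (PySem.Dict.getD
          (wordList.foldl (fun d w' =>
            (PySem.Set.ofList w'.toList).foldl (fun d2 c' =>
              PySem.Dict.insert d2 c' (PySem.Set.add (PySem.Dict.getD d2 c' PySem.Set.empty) w')) d)
            PySem.Dict.empty)
          c PySem.Set.empty)) PySem.Set.empty) v
    = pvShares w v := by
  rcases hb : pvShares w v with _ | _
  · rw [Bool.eq_false_iff]
    intro hc
    rw [PySem.Set.contains_iff, pvUnionMem] at hc
    rcases hc with hc | ⟨c, hcw, hcm⟩
    · simp at hc
    · rw [pvIndexMem] at hcm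
      rcases hcm with hcm | ⟨w', _, hcw', rfl⟩
      · simp at hcm
      · rw [PySem.Set.mem_ofList] at hcw
        have ht : pvShares w v = true := by
          simp only [pvShares, List.any_eq_true]
          exact ⟨c, hcw, by simpa using hcw'⟩
        rw [hb] at ht
        exact Bool.false_ne_true ht
  · rw [PySem.Set.contains_iff, pvUnionMem]
    simp only [pvShares, List.any_eq_true] at hb
    rcases hb with ⟨c, hcw, hcv⟩
    refine Or.inr ⟨c, ?_, ?_⟩
    · rwa [PySem.Set.mem_ofList]
    · rw [pvIndexMem]
      exact Or.inr ⟨v, hv, by simpa using hcv, rfl⟩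

/-- B's neighbour pass for one word equals `pvShare`. -/
theorem pvFilterEq (wordList : List String) (w : String) :
    wordList.foldl (fun ns v =>
      if PySem.Set.contains
          ((PySem.Set.ofList w.toList).foldl (fun s c =>
            PySem.Set.union s (PySem.Dict.getD
              (wordList.foldl (fun d w' =>
                (PySem.Set.ofList w'.toList).foldl (fun d2 c' =>
                  PySem.Dict.insert d2 c' (PySem.Set.add (PySem.Dict.getD d2 c' PySem.Set.empty) w')) d)
                PySem.Dict.empty)
              c PySem.Set.empty)) PySem.Set.empty) v
          && !(ns.contains v)
      then ns ++ [v] else ns) []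
    = pvShare wordList w := by
  unfold pvShare
  apply PySem.List.foldl_congr_mem
  intro acc v hv
  rw [pvCandEq wordList w v hv]

-- Step 3: insert-always vs insert-if-absent over the same value function ---

/-- Invariant: every stored value is the canonical value of its key. -/
def pvInv (f : String → List String) (d : PySem.Dict String (List String)) : Prop :=
  ∀ p ∈ d.items, p.2 = f p.1

theorem pvInsert_self (f : String → List String) (d : PySem.Dict String (List String))
    (hI : pvInv f d) (w : String) (hc : d.contains w = true) :
    d.insert w (f w) = d := by
  apply PySem.Dict.ext
  simp only [PySem.Dict.items_insert, hc, if_true]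
  have hid : ∀ p ∈ d.items, (if (p.1 == w) = true then (w, f w) else p) = id p := by
    intro p hp
    by_cases h : p.1 == w
    · simp only [h, if_pos, id]
      have := hI p hp
      have h1 : p.1 = w := by simpa using h
      rw [← h1, ← this]
    · simp [h]
  rw [List.map_congr_left hid, List.map_id]

theorem pvInv_insert (f : String → List String) (d : PySem.Dict String (List String))
    (hI : pvInv f d) (w : String) : pvInv f (d.insert w (f w)) := by
  intro p hp
  rw [PySem.Dict.items_insert] at hp
  by_cases hc : d.contains w = true
  · rw [if_pos hc] at hp
    rcases List.mem_map.mp hp with ⟨q, hq, rfl⟩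
    by_cases h : q.1 == w
    · simp [h]
    · simpa [h] using hI q hq
  · rw [if_neg (by simpa using hc)] at hp
    rcases List.mem_append.mp hp with hp | hp
    · exact hI p hp
    · simp at hp
      simp [hp]

theorem pvFoldEq (f : String → List String) (l : List String)
    (d : PySem.Dict String (List String)) (hI : pvInv f d) :
    l.foldl (fun d w => d.insert w (f w)) d
    = l.foldl (fun d w => if d.contains w then d else d.insert w (f w)) d := by
  induction l generalizing d with
  | nil => rfl
  | cons w l ih =>
    simp only [List.foldl_cons]
    by_cases hc : d.contains w = true
    · rw [if_pos hc, pvInsert_self f d hI w hc]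
      exact ih d hI
    · rw [if_neg (by simpa using hc)]
      exact ih _ (pvInv_insert f d hI w)

-- ===== VERDICT (by name: the statement is the Claim_ definition above) =====
theorem shareALetter_spec : Claim_equal_shareALetter := by
  intro wordList _
  show shareALetter wordList = shareALetter_alt wordList
  unfold shareALetter shareALetter_alt
  congr 1
  have hA : (fun (d : PySem.Dict String (List String)) word =>
      PySem.Dict.insert d word
        (wordList.foldl (fun sharedWords iw =>
          (PySem.List.pyRange 0 (PySem.Str.len word) 1).foldl (fun sw x =>
            if iw.toList.contains (PySem.List.pyGetD word.toList x ' ')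
                && !(sw.contains iw)
            then sw ++ [iw] else sw) sharedWords) []))
      = fun d w => PySem.Dict.insert d w (pvShare wordList w) := by
    funext d w
    rw [pvInnerEq]
  rw [hA, pvFoldEq (pvShare wordList) wordList PySem.Dict.empty (by intro p hp; simp [PySem.Dict.empty] at hp)]
  apply PySem.List.foldl_congr_mem
  intro acc w _
  by_cases hc : acc.contains w = true
  · simp [hc]
  · simp only [hc, Bool.false_eq_true, if_false]
    rw [pvFilterEq]
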